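-- pv_equiv track=rewrite | github.com/superguymj/LSC | SRLS.py | count_conflict_pairs
-- ===== SOURCE A (Python) =====
-- from collections import Counter
-- from typing import List
--
-- def count_conflict_pairs(square: List[List[int]]) -> int:
--     """
--     冲突格子对数 = 行冲突对 + 列冲突对
--     若某值在一行/列中出现 c 次，则贡献 C(c,2)
--     """
--     n = len(square)
--     if any(len(row) != n for row in square):
--         raise ValueError("Square is not n x n.")
--
--     def pairs(values: List[int]) -> int:
--         cnt = Counter(values)
--         return sum(v * (v - 1) // 2 for v in cnt.values() if v > 1)
--
--     ans = 0
--     for row in square: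
--         ans += pairs(row)
--
--     for j in range(n):
--         col = [square[i][j] for i in range(n)]
--         ans += pairs(col)
--
--     return ans
-- ===== SOURCE B (Python) =====
-- def count_conflict_pairs(square):
--     n = len(square)
--     if any(len(row) != n for row in square):
--         raise ValueError("Square is not n x n.")
--
--     def line_pairs(line):
--         # brute force, no frequency table: each element is compared with the
--         # elements after it, by counting it in the remaining suffix
--         ans = 0
--         rest = line
--         while rest:
--             v, rest = rest[0], rest[1:]
--             ans += rest.count(v)
--         return ans
--
--     return sum(line_pairs(r) for r in square) + sum(line_pairs(list(c)) for c in zip(*square))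
-- ===== Notes on version B (the rewrite author's own statement) =====
-- stated objective: alternative
-- what changed: Replaces the Counter-based frequency table and the C(c,2) formula by direct brute-force pair counting: each element is counted in the suffix after it (rest.count(v) on a shrinking suffix), applied to the rows and a zip(*square) transpose; no frequency table and no binomial formula anywhere.
import Mathlib
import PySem

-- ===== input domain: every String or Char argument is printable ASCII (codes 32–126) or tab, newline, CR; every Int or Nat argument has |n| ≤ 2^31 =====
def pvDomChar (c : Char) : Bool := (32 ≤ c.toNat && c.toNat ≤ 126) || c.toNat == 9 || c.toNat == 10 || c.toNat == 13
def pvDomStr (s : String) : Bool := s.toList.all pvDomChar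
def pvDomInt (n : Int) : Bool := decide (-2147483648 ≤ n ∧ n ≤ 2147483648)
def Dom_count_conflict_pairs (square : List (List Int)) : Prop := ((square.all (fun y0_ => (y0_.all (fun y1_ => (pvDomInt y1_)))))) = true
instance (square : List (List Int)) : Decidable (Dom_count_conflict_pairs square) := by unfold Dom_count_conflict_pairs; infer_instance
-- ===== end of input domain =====

-- B replaces A's Counter frequency table and C(c,2) formula by direct brute-force pair
-- counting (each element counted in the suffix after it) over the rows and a
-- zip(*square) transpose (objective: alternative; B is O(n^3) vs A's O(n^2)).

-- ===== PORT A =====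
-- helper `pairs`: Counter the values, sum v*(v-1)//2 over counts v > 1
def pvPairsA (values : List Int) : Int :=
  ((((PySem.Dict.counter values).values.filter (fun v => decide (1 < v)))).map
    (fun v => PySem.Int.floordiv (v * (v - 1)) 2)).sum

def count_conflict_pairs (square : List (List Int)) : Int :=
  if square.any (fun row => PySem.List.len row != PySem.List.len square) then 0  -- Python raises ValueError here; outside Pre_
  else
    -- ans = sum of pairs(row); then for j in range(n): col = [square[i][j] for i in range(n)]; ans += pairs(col)
    -- pyGetD is exact here: the guard makes every index i, j in range
    (PySem.List.pyRange 0 (PySem.List.len square) 1).foldl (fun acc j =>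
      acc + pvPairsA ((PySem.List.pyRange 0 (PySem.List.len square) 1).map (fun i =>
        PySem.List.pyGetD (PySem.List.pyGetD square i []) j 0)))
      (square.foldl (fun acc row => acc + pvPairsA row) 0)

-- ===== PORT B =====
-- helper `line_pairs`: while rest: v, rest = rest[0], rest[1:]; ans += rest.count(v)
-- (the while loop over the shrinking suffix is structural recursion on the list)
def pvLinePairs : List Int → Int
  | [] => 0
  | v :: rest => PySem.List.count rest v + pvLinePairs rest

-- zip(*rows): truncates at the shortest row; element j of a tuple is row[j], exact since j < every length
def pvZipStar (rows : List (List Int)) : List (List Int) :=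
  (List.range (((rows.map (fun r => r.length)).min?).getD 0)).map
    (fun j => rows.map (fun r => r.getD j 0))

def count_conflict_pairs_alt (square : List (List Int)) : Int :=
  if square.any (fun row => PySem.List.len row != PySem.List.len square) then 0  -- Python raises ValueError here; outside Pre_
  else (square.map pvLinePairs).sum + ((pvZipStar square).map pvLinePairs).sum

-- ===== PRECONDITION & SPEC =====
-- Pre_ excludes exactly the ragged inputs, on which A (and B) raise ValueError
def Pre_count_conflict_pairs (square : List (List Int)) : Prop :=
  ∀ row ∈ square, row.length = square.length
instance (square : List (List Int)) : Decidable (Pre_count_conflict_pairs square) := by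
  unfold Pre_count_conflict_pairs; infer_instance

def pvWitness_count_conflict_pairs : List (List Int) := [[1, 2], [2, 2]]

def Spec_count_conflict_pairs (square : List (List Int)) (out : Int) : Prop :=
  out = count_conflict_pairs_alt square
instance (square : List (List Int)) (out : Int) : Decidable (Spec_count_conflict_pairs square out) := by
  unfold Spec_count_conflict_pairs; infer_instance

-- ===== CLAIM (what is proved, stated in full; the proofs are below) =====
def Claim_equal_count_conflict_pairs : Prop := ∀ (square : List (List Int)), Dom_count_conflict_pairs square → Pre_count_conflict_pairs square → Spec_count_conflict_pairs square (count_conflict_pairs square)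

-- ===== LEMMAS AND PROOFS =====

def pvC2 (c : Int) : Int := PySem.Int.floordiv (c * (c - 1)) 2

def pvP (l : List Int) : Int :=
  ((PySem.Set.ofList l).map (fun k => pvC2 ((l.count k : Nat) : Int))).sum

theorem pv_sum_map_filter_eq (f : Int → Int) (p : Int → Bool) :
    ∀ (xs : List Int), (∀ x ∈ xs, p x = false → f x = 0) →
      ((xs.filter p).map f).sum = (xs.map f).sum := by
  intro xs
  induction xs with
  | nil => intro _; rfl
  | cons a t ih =>
    intro h
    cases hp : p a with
    | true => simp [hp, ih (fun x hx => h x (List.mem_cons_of_mem _ hx))]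
    | false =>
      simp [hp, ih (fun x hx => h x (List.mem_cons_of_mem _ hx)),
        h a (List.mem_cons_self) hp]

theorem pvC2_succ (c : Nat) : pvC2 ((c : Int) + 1) = pvC2 (c : Int) + c := by
  unfold pvC2
  rw [PySem.Int.floordiv_eq_ediv_of_pos (by norm_num),
      PySem.Int.floordiv_eq_ediv_of_pos (by norm_num)]
  have h : ((c : Int) + 1) * ((c : Int) + 1 - 1) = (c : Int) * ((c : Int) - 1) + (c : Int) * 2 := by
    ring
  rw [h, Int.add_mul_ediv_right _ _ (by norm_num)]

theorem pvC2_le_one {c : Int} (h0 : 0 ≤ c) (h1 : c ≤ 1) : pvC2 c = 0 := by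
  interval_cases c <;> decide

theorem pairsA_eq_P (l : List Int) : pvPairsA l = pvP l := by
  unfold pvPairsA pvP
  have hv : (PySem.Dict.counter l).values
      = (PySem.Set.ofList l).map (fun k => ((l.count k : Nat) : Int)) := by
    unfold PySem.Dict.values
    rw [PySem.Dict.items_counter, List.map_map]
    rfl
  rw [hv, pv_sum_map_filter_eq]
  · rw [List.map_map]
    rfl
  · intro x hx hpx
    rcases List.mem_map.mp hx with ⟨k, _, rfl⟩
    have : ((l.count k : Nat) : Int) ≤ 1 := by
      by_contra hc
      simp at hpx
      omega
    exact pvC2_le_one (by positivity) this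

theorem pv_sum_shift (x : Int) (d : Int) :
    ∀ (s : List Int) (g g' : Int → Int), s.Nodup → x ∈ s →
      g' x = g x + d → (∀ k, k ≠ x → g' k = g k) →
      (s.map g').sum = (s.map g).sum + d := by
  intro s
  induction s with
  | nil => intro g g' _ hx; exact absurd hx (List.not_mem_nil)
  | cons a t ih =>
    intro g g' hnd hx hgx hg
    rcases List.nodup_cons.mp hnd with ⟨hat, hndt⟩
    rcases List.mem_cons.mp hx with rfl | hxt
    · have ht : t.map g' = t.map g := by
        apply List.map_congr_left
        intro k hk
        exact hg k (fun h => hat (h ▸ hk))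
      simp [ht, hgx]
      ring
    · have hax : a ≠ x := fun h => hat (h ▸ hxt)
      simp [hg a hax, ih g g' hndt hxt hgx hg]
      ring

theorem pvP_append_singleton (l : List Int) (x : Int) :
    pvP (l ++ [x]) = pvP l + (l.count x : Nat) := by
  have hset : PySem.Set.ofList (l ++ [x]) = PySem.Set.add (PySem.Set.ofList l) x := by
    rw [PySem.Set.ofList_eq_foldl, PySem.Set.ofList_eq_foldl, List.foldl_append]
    rfl
  have hcount : ∀ k : Int, (l ++ [x]).count k = l.count k + if x = k then 1 else 0 := by
    intro k
    simp [List.count_append, List.count_singleton]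
  by_cases hx : x ∈ l
  · have hmem : x ∈ PySem.Set.ofList l := (PySem.Set.mem_ofList l x).mpr hx
    have hadd : PySem.Set.add (PySem.Set.ofList l) x = PySem.Set.ofList l := by
      unfold PySem.Set.add
      rw [if_pos]
      exact (PySem.Set.contains_iff _ _).mpr hmem
    unfold pvP
    rw [hset, hadd]
    apply pv_sum_shift x ((l.count x : Nat)) _ _ _ (PySem.Set.nodup_ofList l) hmem
    · rw [hcount x, if_pos rfl]
      push_cast
      exact pvC2_succ (l.count x)
    · intro k hk
      rw [hcount k, if_neg (fun h => hk h.symm)]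
      simp
  · have hnmem : x ∉ PySem.Set.ofList l := fun h => hx ((PySem.Set.mem_ofList l x).mp h)
    have hadd : PySem.Set.add (PySem.Set.ofList l) x = PySem.Set.ofList l ++ [x] := by
      unfold PySem.Set.add
      rw [if_neg]
      simp only [PySem.Set.contains_iff _ _]
      exact hnmem
    have hcx : l.count x = 0 := List.count_eq_zero.mpr hx
    unfold pvP
    rw [hset, hadd, List.map_append, List.sum_append, hcx]
    have h1 : (PySem.Set.ofList l).map (fun k => pvC2 (((l ++ [x]).count k : Nat) : Int))
        = (PySem.Set.ofList l).map (fun k => pvC2 ((l.count k : Nat) : Int)) := by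
      apply List.map_congr_left
      intro k hk
      have hkx : x ≠ k := by
        intro h; exact hnmem (h ▸ hk)
      rw [hcount k, if_neg hkx]
      simp
    rw [h1]
    have hC : pvC2 1 = 0 := by decide
    simp [hcount, hcx, hC]

theorem pvLinePairs_append_singleton (l : List Int) (x : Int) :
    pvLinePairs (l ++ [x]) = pvLinePairs l + (l.count x : Nat) := by
  induction l with
  | nil => simp [pvLinePairs]
  | cons a t ih =>
    simp only [List.cons_append, pvLinePairs, ih, PySem.List.count_eq,
      List.count_append, List.count_cons]
    by_cases h : x = a
    · simp [h]
      push_cast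
      ring
    · simp [h, show ¬a = x from fun hh => h hh.symm]
      ring

theorem linePairs_eq_P (l : List Int) : pvLinePairs l = pvP l := by
  induction l using List.reverseRecOn with
  | nil => rfl
  | append_singleton l x ih =>
    rw [pvLinePairs_append_singleton, pvP_append_singleton, ih]

theorem pairs_agree (l : List Int) : pvPairsA l = pvLinePairs l :=
  (pairsA_eq_P l).trans (linePairs_eq_P l).symm

theorem pv_range_getD_map {α β : Type} (xs : List α) (g : α → β) (d : α) :
    (List.range xs.length).map (fun i => g (xs.getD i d)) = xs.map g := by
  apply List.ext_getElem
  · simp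
  · intro i h1 h2
    simp only [List.getElem_map, List.getElem_range]
    rw [List.getD_eq_getElem xs d (by simpa using h2)]

theorem pv_min_replicate (n : Nat) (N : Nat) :
    (List.replicate (n + 1) N).min? = some N := by
  induction n with
  | zero => rfl
  | succ k ih =>
    rw [List.replicate_succ, List.min?_cons]
    rw [List.replicate_succ, List.min?_cons] at ih
    simp_all [min_self]

theorem pv_zipstar_pre (sq : List (List Int)) (hpre : ∀ row ∈ sq, row.length = sq.length) :
    pvZipStar sq = (List.range sq.length).map (fun j => sq.map (fun r => r.getD j 0)) := by
  unfold pvZipStar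
  cases sq with
  | nil => rfl
  | cons a t =>
    have hrep : ((a :: t).map (fun r => r.length)) = List.replicate (a :: t).length ((a :: t).length : Nat) := by
      rw [List.eq_replicate_iff]
      constructor
      · simp
      · intro b hb
        rcases List.mem_map.mp hb with ⟨r, hr, rfl⟩
        exact hpre r hr
    rw [hrep]
    have h : (a :: t).length = t.length + 1 := rfl
    rw [h, pv_min_replicate]
    rfl

theorem pv_main_eq (sq : List (List Int)) (hpre : ∀ row ∈ sq, row.length = sq.length) :
    count_conflict_pairs sq = count_conflict_pairs_alt sq := by
  unfold count_conflict_pairs count_conflict_pairs_alt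
  rw [if_neg (by simp; exact fun x hx => hpre x hx), if_neg (by simp; exact fun x hx => hpre x hx)]
  rw [show pvPairsA = pvLinePairs from funext pairs_agree]
  rw [PySem.List.foldl_add, PySem.List.foldl_add, pv_zipstar_pre sq hpre]
  simp only [PySem.List.len_eq, PySem.List.pyRange_zero_natCast, List.map_map,
    Function.comp_def, PySem.List.pyGetD_natCast]
  have hcol : ∀ j : Nat,
      (List.range sq.length).map (fun i => (sq.getD i []).getD j 0)
        = sq.map (fun r => r.getD j 0) :=
    fun j => pv_range_getD_map sq (fun r => r.getD j 0) []
  simp only [hcol]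
  omega

-- ===== VERDICT (by name: the statement is the Claim_ definition above) =====
theorem count_conflict_pairs_spec : Claim_equal_count_conflict_pairs := by
  intro square _ hpre
  unfold Spec_count_conflict_pairs
  exact pv_main_eq square hpre
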